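-- pv_equiv track=rewrite | github.com/olivierkokkedee/BEP-quantum-battery | calc_nJ.py | calculate_nJ
-- ===== SOURCE A (Python) =====
-- from itertools import combinations
--
-- def generate_spin_states(N, m):
--     states = []
--     for indices in combinations(range(N), m):
--         state = [1 if i in indices else 0 for i in range(N)]
--         states.append(state)
--     return states
--
-- def calculate_nJ(N, m):
--     nJ = 0
--     states = generate_spin_states(N, m)
--     for lst in states:
--         nJ_temp = 0
--         for i in range(N-1):
--             if lst[i] != lst[i+1]:
--                 nJ_temp += 1
--         nJ += nJ_temp
--     return nJ
-- ===== SOURCE B (Python) =====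
-- def calculate_nJ(N, m):
--     # Closed form: each of the N-1 adjacent pairs differs in exactly
--     # 2*C(N-2, m-1) of the C(N, m) states, so the total is
--     # 2*(N-1)*C(N-2, m-1).  Outside 2 <= N and 1 <= m <= N-1 no state
--     # has a differing adjacent pair, so the answer is 0.
--     if N < 2 or m < 1 or m > N - 1:
--         return 0
--     c = 1  # running binomial coefficient C(N-2, i+1) after step i
--     for i in range(m - 1):
--         c = c * (N - 2 - i) // (i + 1)
--     return 2 * (N - 1) * c
-- ===== Notes on version B (the rewrite author's own statement) =====
-- stated objective: alternative
-- what changed: Replaces the enumeration of all C(N,m) spin states and their adjacent-flip scans by the closed form 2*(N-1)*C(N-2,m-1), computed with an O(m) exact multiplicative binomial loop (a timing run could not confirm a uniform speed-up: for huge m the exact big-integer binomial grows too).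
import Mathlib
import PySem

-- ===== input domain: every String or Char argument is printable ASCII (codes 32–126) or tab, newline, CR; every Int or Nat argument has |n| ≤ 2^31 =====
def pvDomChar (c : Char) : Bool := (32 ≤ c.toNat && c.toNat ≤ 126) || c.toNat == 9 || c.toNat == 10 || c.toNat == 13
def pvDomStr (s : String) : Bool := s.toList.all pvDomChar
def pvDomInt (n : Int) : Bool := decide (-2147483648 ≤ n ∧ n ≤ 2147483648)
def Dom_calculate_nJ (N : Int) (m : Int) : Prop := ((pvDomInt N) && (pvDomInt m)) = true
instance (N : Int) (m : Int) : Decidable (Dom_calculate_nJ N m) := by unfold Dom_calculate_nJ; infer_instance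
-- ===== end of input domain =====

-- B replaces A's enumeration of all C(N,m) spin states by the closed form
-- 2*(N-1)*C(N-2,m-1) computed with an exact multiplicative binomial loop (objective: alternative).

-- ===== PORT A =====
-- itertools.combinations(l, k) in lexicographic order (those containing the head first);
-- like itertools, it yields nothing at once when k exceeds the pool length
def pyCombos : List Int → Nat → List (List Int)
  | _, 0 => [[]]
  | [], _ + 1 => []
  | x :: xs, k + 1 =>
    if xs.length < k then []
    else (pyCombos xs k).map (fun c => x :: c) ++ pyCombos xs (k + 1)

def generate_spin_states (N : Int) (m : Int) : List (List Int) :=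
  (pyCombos (PySem.List.pyRange 0 N 1) m.toNat).map (fun indices =>
    (PySem.List.pyRange 0 N 1).map (fun i => if indices.contains i then (1 : Int) else 0))

def calculate_nJ (N : Int) (m : Int) : Int :=
  (generate_spin_states N m).foldl (fun nJ lst =>
    nJ + (PySem.List.pyRange 0 (N - 1) 1).foldl
      (fun t i => if PySem.List.pyGetD lst i 0 ≠ PySem.List.pyGetD lst (i + 1) 0 then t + 1 else t)
      0) 0

-- ===== PORT B =====
def calculate_nJ_alt (N : Int) (m : Int) : Int :=
  if N < 2 ∨ m < 1 ∨ m > N - 1 then 0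
  else
    2 * (N - 1) *
      (PySem.List.pyRange 0 (m - 1) 1).foldl
        (fun c i => PySem.Int.floordiv (c * (N - 2 - i)) (i + 1)) 1

-- ===== PRECONDITION & SPEC =====
-- Pre_ excludes only m < 0, where itertools.combinations makes A raise ValueError.
def Pre_calculate_nJ (N : Int) (m : Int) : Prop := 0 ≤ m
instance (N : Int) (m : Int) : Decidable (Pre_calculate_nJ N m) := by unfold Pre_calculate_nJ; infer_instance
def pvWitness_calculate_nJ : Int × Int := (4, 2)

def Spec_calculate_nJ (N : Int) (m : Int) (out : Int) : Prop := out = calculate_nJ_alt N m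
instance (N : Int) (m : Int) (out : Int) : Decidable (Spec_calculate_nJ N m out) := by unfold Spec_calculate_nJ; infer_instance

-- ===== CLAIM (what is proved, stated in full; the proofs are below) =====
def Claim_equal_calculate_nJ : Prop := ∀ (N : Int) (m : Int), Dom_calculate_nJ N m → Pre_calculate_nJ N m → Spec_calculate_nJ N m (calculate_nJ N m)

-- ===== LEMMAS AND PROOFS =====

-- count of adjacent unequal entries
def flipsN : List Int → Nat
  | a :: b :: t => (if a ≠ b then 1 else 0) + flipsN (b :: t)
  | _ => 0

-- all 0/1 lists of length n with k ones
def statesN : Nat → Nat → List (List Int)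
  | 0, 0 => [[]]
  | 0, _ + 1 => []
  | n + 1, 0 => (statesN n 0).map (fun s => 0 :: s)
  | n + 1, k + 1 => (statesN n k).map (fun s => 1 :: s) ++ (statesN n (k + 1)).map (fun s => 0 :: s)

-- characteristic 0/1 vector of idx over the base list
def st (base idx : List Int) : List Int := base.map (fun i => if idx.contains i then (1 : Int) else 0)

def sumF (n k : Nat) : Nat := ((statesN n k).map flipsN).sum

def FF : Nat → Nat → Nat
  | _, 0 => 0
  | n, k + 1 => 2 * (n - 1) * Nat.choose (n - 2) k

lemma mem_pyCombos_sub {l : List Int} {k : Nat} {c : List Int} (h : c ∈ pyCombos l k) :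
    ∀ x ∈ c, x ∈ l := by
  induction l, k using pyCombos.induct generalizing c with
  | case1 l => simp_all [pyCombos]
  | case2 k => simp_all [pyCombos]
  | case3 x xs k hlen => simp_all [pyCombos]
  | case4 x xs k hlen ih1 ih2 =>
    simp only [pyCombos, if_neg hlen, List.mem_append, List.mem_map] at h
    rcases h with ⟨c', hc', rfl⟩ | h
    · intro y hy
      rcases List.mem_cons.mp hy with rfl | hy
      · exact List.mem_cons_self
      · exact List.mem_cons_of_mem _ (ih1 hc' y hy)
    · exact fun y hy => List.mem_cons_of_mem _ (ih2 h y hy)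

lemma statesN_nil {n k : Nat} (h : n < k) : statesN n k = [] := by
  induction n generalizing k with
  | zero => match k, h with | k + 1, _ => rfl
  | succ n ih =>
    match k, h with
    | k + 1, h =>
      simp only [statesN]
      rw [ih (by omega), ih (by omega)]
      simp

lemma map_st_pyCombos (l : List Int) (k : Nat) (hnd : l.Nodup) :
    (pyCombos l k).map (st l) = statesN l.length k := by
  induction l generalizing k with
  | nil => cases k <;> simp [pyCombos, statesN, st]
  | cons a l' ih =>
    have ha : a ∉ l' := (List.nodup_cons.mp hnd).1
    have hnd' : l'.Nodup := (List.nodup_cons.mp hnd).2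
    have hst : ∀ c : List Int, a ∉ c → st (a :: l') c = 0 :: st l' c := by
      intro c hc
      simp only [st, List.map_cons, List.contains_eq_mem, decide_eq_true_eq]
      rw [if_neg hc]
    have hst1 : ∀ c : List Int, st (a :: l') (a :: c) = 1 :: st l' c := by
      intro c
      simp only [st, List.map_cons, List.contains_eq_mem, decide_eq_true_eq,
        List.mem_cons, true_or, if_true]
      congr 1
      apply List.map_congr_left
      intro i hi
      have : i ≠ a := fun h => ha (h ▸ hi)
      simp [this]
    cases k with
    | zero =>
      simp only [pyCombos, statesN, List.length_cons, List.map_cons, List.map_nil, ← ih 0 hnd']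
      simp [pyCombos, hst [] (by simp)]
    | succ k =>
      by_cases hlen : l'.length < k
      · have h1 : pyCombos (a :: l') (k + 1) = [] := by
          simp only [pyCombos, if_pos hlen]
        have h2 : statesN (a :: l').length (k + 1) = [] :=
          statesN_nil (by simp; omega)
        rw [h1, h2, List.map_nil]
      · simp only [pyCombos, if_neg hlen, statesN, List.length_cons, List.map_append,
          List.map_map]
        congr 1
        · rw [← ih k hnd', List.map_map]
          apply List.map_congr_left
          intro c _
          simp [hst1 c]
        · rw [← ih (k + 1) hnd', List.map_map]
          apply List.map_congr_left
          intro c hc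
          have hac : a ∉ c := fun h => ha (mem_pyCombos_sub hc a h)
          simp [hst c hac]

lemma length_mem_statesN {n k : Nat} {s : List Int} (h : s ∈ statesN n k) : s.length = n := by
  induction n, k using statesN.induct generalizing s with
  | case1 => simp_all [statesN]
  | case2 => simp_all [statesN]
  | case3 n ih =>
    simp only [statesN, List.mem_map] at h
    obtain ⟨s', hs', rfl⟩ := h
    simp [ih hs']
  | case4 n k ih1 ih2 =>
    simp only [statesN, List.mem_append, List.mem_map] at h
    rcases h with ⟨s', hs', rfl⟩ | ⟨s', hs', rfl⟩
    · simp [ih1 hs']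
    · simp [ih2 hs']

lemma len_statesN (n k : Nat) : (statesN n k).length = n.choose k := by
  induction n, k using statesN.induct with
  | case1 => simp [statesN]
  | case2 => simp [statesN]
  | case3 n ih => simp [statesN, ih]
  | case4 n k ih1 ih2 => simp [statesN, ih1, ih2, Nat.choose_succ_succ, Nat.add_comm]

def hd0 (s : List Int) : Nat := if s.head? = some 0 then 1 else 0
def hd1 (s : List Int) : Nat := if s.head? = some 1 then 1 else 0

lemma heads_statesN {n k : Nat} {s : List Int} (h : s ∈ statesN n k) :
    s = [] ∨ s.head? = some 0 ∨ s.head? = some 1 := by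
  match n, k with
  | 0, 0 => simp_all [statesN]
  | 0, _ + 1 => simp_all [statesN]
  | n + 1, 0 =>
    simp only [statesN, List.mem_map] at h
    obtain ⟨s', _, rfl⟩ := h
    simp
  | n + 1, k + 1 =>
    simp only [statesN, List.mem_append, List.mem_map] at h
    rcases h with ⟨s', _, rfl⟩ | ⟨s', _, rfl⟩ <;> simp

lemma flips_cons1 {s : List Int} (hb : s = [] ∨ s.head? = some 0 ∨ s.head? = some 1) :
    flipsN (1 :: s) = hd0 s + flipsN s := by
  match s with
  | [] => simp [flipsN, hd0]
  | c :: t =>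
    rcases hb with h | h | h
    · exact absurd h (by simp)
    · simp only [List.head?_cons, Option.some.injEq] at h
      subst h; simp [flipsN, hd0]
    · simp only [List.head?_cons, Option.some.injEq] at h
      subst h; simp [flipsN, hd0]

lemma flips_cons0 {s : List Int} (hb : s = [] ∨ s.head? = some 0 ∨ s.head? = some 1) :
    flipsN (0 :: s) = hd1 s + flipsN s := by
  match s with
  | [] => simp [flipsN, hd1]
  | c :: t =>
    rcases hb with h | h | h
    · exact absurd h (by simp)
    · simp only [List.head?_cons, Option.some.injEq] at h
      subst h; simp [flipsN, hd1]
    · simp only [List.head?_cons, Option.some.injEq] at h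
      subst h; simp [flipsN, hd1]

lemma sum_hd0_statesN (n k : Nat) : ((statesN (n + 1) k).map hd0).sum = n.choose k := by
  cases k with
  | zero =>
    have := len_statesN n 0
    simp only [statesN, List.map_map]
    have : ∀ s : List Int, hd0 (0 :: s) = 1 := fun s => by simp [hd0]
    simp [Function.comp_def, this, len_statesN]
  | succ k =>
    simp only [statesN, List.map_append, List.map_map, List.sum_append]
    have h1 : ∀ s : List Int, hd0 (1 :: s) = 0 := fun s => by simp [hd0]
    have h0 : ∀ s : List Int, hd0 (0 :: s) = 1 := fun s => by simp [hd0]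
    simp [Function.comp_def, h1, h0, len_statesN]

lemma sum_hd1_zero (n : Nat) : ((statesN n 0).map hd1).sum = 0 := by
  cases n with
  | zero => simp [statesN, hd1]
  | succ n =>
    simp only [statesN, List.map_map]
    have : ∀ s : List Int, hd1 (0 :: s) = 0 := fun s => by simp [hd1]
    simp [Function.comp_def, this]

lemma sum_hd1_statesN (n k : Nat) : ((statesN (n + 1) (k + 1)).map hd1).sum = n.choose k := by
  simp only [statesN, List.map_append, List.map_map, List.sum_append]
  have h1 : ∀ s : List Int, hd1 (1 :: s) = 1 := fun s => by simp [hd1]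
  have h0 : ∀ s : List Int, hd1 (0 :: s) = 0 := fun s => by simp [hd1]
  simp [Function.comp_def, h1, h0, len_statesN]

lemma map_flips_cons1 (n k : Nat) :
    ((statesN n k).map (fun s => flipsN (1 :: s))).sum
      = ((statesN n k).map hd0).sum + sumF n k := by
  unfold sumF
  rw [← List.sum_map_add]
  congr 1
  apply List.map_congr_left
  intro s hs
  exact flips_cons1 (heads_statesN hs)

lemma map_flips_cons0 (n k : Nat) :
    ((statesN n k).map (fun s => flipsN (0 :: s))).sum
      = ((statesN n k).map hd1).sum + sumF n k := by
  unfold sumF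
  rw [← List.sum_map_add]
  congr 1
  apply List.map_congr_left
  intro s hs
  exact flips_cons0 (heads_statesN hs)

lemma sumF_eq (n k : Nat) : sumF n k = FF n k := by
  induction n generalizing k with
  | zero => cases k <;> simp [sumF, statesN, FF, flipsN]
  | succ n ih =>
    cases k with
    | zero =>
      unfold sumF
      simp only [statesN, List.map_map]
      have : ((statesN n 0).map (flipsN ∘ (fun s => 0 :: s))).sum
          = ((statesN n 0).map (fun s => flipsN (0 :: s))).sum := rfl
      rw [this, map_flips_cons0, sum_hd1_zero, ih 0]
      simp [FF]
    | succ k =>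
      unfold sumF
      simp only [statesN, List.map_append, List.map_map, List.sum_append]
      have e1 : ((statesN n k).map (flipsN ∘ (fun s => 1 :: s))).sum
          = ((statesN n k).map (fun s => flipsN (1 :: s))).sum := rfl
      have e0 : ((statesN n (k + 1)).map (flipsN ∘ (fun s => 0 :: s))).sum
          = ((statesN n (k + 1)).map (fun s => flipsN (0 :: s))).sum := rfl
      rw [e1, e0, map_flips_cons1, map_flips_cons0, ih k, ih (k + 1)]
      cases n with
      | zero => cases k <;> simp [statesN, hd0, hd1, FF]
      | succ n =>
        rw [sum_hd0_statesN, sum_hd1_statesN]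
        cases k with
        | zero => simp [FF]; omega
        | succ k =>
          cases n with
          | zero => simp [FF]
          | succ n =>
            have p : (n + 1).choose (k + 1) = n.choose k + n.choose (k + 1) :=
              Nat.choose_succ_succ _ _
            rw [show ((n+1)+1 : Nat) = n+2 from rfl, show ((n+1)+2 : Nat) = n+3 from rfl] at *
            simp only [FF, show (n+2-1 : Nat) = n+1 from rfl, show (n+2-2 : Nat) = n from rfl,
              show (n+3-1 : Nat) = n+2 from rfl, show (n+3-2 : Nat) = n+1 from rfl]
            rw [p]
            ring

lemma pyGetD_cons_succ (x : Int) (s : List Int) (i : Int) (h : 0 ≤ i) (d : Int) :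
    PySem.List.pyGetD (x :: s) (i + 1) d = PySem.List.pyGetD s i d := by
  rw [PySem.List.pyGetD_of_nonneg _ _ (by omega), PySem.List.pyGetD_of_nonneg _ _ h,
    show (i + 1).toNat = i.toNat + 1 by omega, List.getD_cons_succ]

lemma foldl_shift (x : Int) (s : List Int) (a b : Int) (ha : 0 ≤ a) (acc : Int) :
    (PySem.List.pyRange (a + 1) (b + 1) 1).foldl
      (fun t i => if PySem.List.pyGetD (x :: s) i 0 ≠ PySem.List.pyGetD (x :: s) (i + 1) 0 then t + 1 else t) acc
    = (PySem.List.pyRange a b 1).foldl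
      (fun t i => if PySem.List.pyGetD s i 0 ≠ PySem.List.pyGetD s (i + 1) 0 then t + 1 else t) acc := by
  rw [PySem.List.pyRange_one (a + 1) (b + 1), PySem.List.pyRange_one a b,
    show (b + 1 - (a + 1)) = b - a by ring]
  rw [List.foldl_map, List.foldl_map]
  apply PySem.List.foldl_congr_mem
  intro t k _
  have hk : (0 : Int) ≤ a + k := by positivity
  rw [show (a + 1 + (k : Int)) = (a + k) + 1 by ring, pyGetD_cons_succ _ _ _ hk,
    show ((a + k) + 1 : Int) = (a + k) + 1 by ring, pyGetD_cons_succ _ _ _ (by omega)]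

lemma inner_aux : ∀ (s : List Int) (acc : Int),
    (PySem.List.pyRange 0 ((s.length : Int) - 1) 1).foldl
      (fun t i => if PySem.List.pyGetD s i 0 ≠ PySem.List.pyGetD s (i + 1) 0 then t + 1 else t) acc
      = acc + (flipsN s : Int)
  | [], acc => by
    rw [PySem.List.pyRange_one_eq_nil (by simp)]
    simp [flipsN]
  | [x], acc => by
    rw [PySem.List.pyRange_one_eq_nil (by simp)]
    simp [flipsN]
  | a :: b :: t, acc => by
    have hlen : ((a :: b :: t).length : Int) - 1 = ((t.length : Int) + 1) := by
      simp
    rw [hlen, PySem.List.pyRange_one_cons (by positivity), List.foldl_cons]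
    have h0 : PySem.List.pyGetD (a :: b :: t) 0 0 = a := by simp [PySem.List.pyGetD]
    have h1 : PySem.List.pyGetD (a :: b :: t) (0 + 1) 0 = b := by
      rw [show ((0 : Int) + 1) = 1 from rfl]; simp [PySem.List.pyGetD]
    rw [h0, h1]
    have ih := inner_aux (b :: t) (if a ≠ b then acc + 1 else acc)
    have hlen2 : ((b :: t).length : Int) - 1 = (t.length : Int) := by simp
    rw [hlen2] at ih
    have hsh := foldl_shift a (b :: t) 0 (t.length : Int) (le_refl 0)
      (if a ≠ b then acc + 1 else acc)
    norm_num at hsh ih ⊢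
    rw [hsh, ih, show flipsN (a :: b :: t) = (if a ≠ b then 1 else 0) + flipsN (b :: t) from rfl]
    split_ifs <;> push_cast <;> omega

lemma inner_eq (s : List Int) :
    (PySem.List.pyRange 0 ((s.length : Int) - 1) 1).foldl
      (fun t i => if PySem.List.pyGetD s i 0 ≠ PySem.List.pyGetD s (i + 1) 0 then t + 1 else t) 0
      = (flipsN s : Int) := by
  simpa using inner_aux s 0

lemma cast_sum_map (l : List (List Int)) (f : List Int → Nat) :
    (l.map (fun s => ((f s : Int)))).sum = ((l.map f).sum : Int) := by
  induction l with
  | nil => simp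
  | cons a t ih => simp [ih]

lemma gen_eq (N m : Int) : generate_spin_states N m = statesN N.toNat m.toNat := by
  unfold generate_spin_states
  have h := map_st_pyCombos (PySem.List.pyRange 0 N 1) m.toNat (PySem.List.nodup_pyRange_one 0 N)
  rw [PySem.List.length_pyRange_one] at h
  rw [show (N - 0 : Int) = N by ring] at h
  exact h

lemma calc_A_eq (N m : Int) (_hm : 0 ≤ m) :
    calculate_nJ N m = (sumF N.toNat m.toNat : Int) := by
  unfold calculate_nJ
  rw [gen_eq, PySem.List.foldl_add]
  rw [show ((0 : Int) + _ = _) from zero_add _]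
  unfold sumF
  rw [← cast_sum_map]
  apply congrArg
  apply List.map_congr_left
  intro s hs
  have hlen : s.length = N.toNat := length_mem_statesN hs
  by_cases hN : 0 ≤ N
  · have : N - 1 = (s.length : Int) - 1 := by rw [hlen]; omega
    rw [this, inner_eq]
  · have hs0 : s = [] := by
      have : N.toNat = 0 := by omega
      rw [this] at hlen
      exact List.length_eq_zero_iff.mp hlen
    subst hs0
    rw [PySem.List.pyRange_one_eq_nil (by omega)]
    simp [flipsN]

lemma FF_zero {n k : Nat} (h : n ≤ 1 ∨ k = 0 ∨ n ≤ k) : FF n k = 0 := by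
  cases k with
  | zero => rfl
  | succ k =>
    simp only [FF]
    by_cases hn : n ≤ 1
    · have : n - 1 = 0 := by omega
      simp [this]
    · rcases h with h | h | h
      · omega
      · omega
      · rw [Nat.choose_eq_zero_of_lt (by omega)]
        simp

lemma binom_fold (N : Int) (hN : 2 ≤ N) : ∀ (t : Nat), (t : Int) ≤ N - 2 →
    (PySem.List.pyRange 0 (t : Int) 1).foldl
      (fun c i => PySem.Int.floordiv (c * (N - 2 - i)) (i + 1)) 1
      = ((N - 2).toNat.choose t : Int)
  | 0, _ => by
    rw [PySem.List.pyRange_one_eq_nil (by omega)]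
    simp
  | t + 1, h => by
    have ih := binom_fold N hN t (by push_cast at h ⊢; omega)
    rw [show (((t + 1 : Nat)) : Int) = (t : Int) + 1 by push_cast; ring,
      PySem.List.pyRange_one_succ_right (by positivity), List.foldl_append, ih,
      List.foldl_cons, List.foldl_nil]
    have hu : (N - 2 - (t : Int)) = (((N - 2).toNat - t : Nat) : Int) := by omega
    have ht : ((t : Int) + 1) = (((t + 1 : Nat)) : Int) := by push_cast; ring
    rw [hu, ht, show (((N - 2).toNat.choose t : Int) * ((((N - 2).toNat - t : Nat)) : Int))
        = (((N - 2).toNat.choose t * ((N - 2).toNat - t) : Nat) : Int) by push_cast; ring,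
      ← Nat.choose_succ_right_eq, PySem.Int.floordiv_natCast,
      Nat.mul_div_cancel _ (Nat.succ_pos t)]

lemma calc_B_eq (N m : Int) (hm : 0 ≤ m) :
    calculate_nJ_alt N m = (FF N.toNat m.toNat : Int) := by
  unfold calculate_nJ_alt
  split_ifs with hg
  · have h : N.toNat ≤ 1 ∨ m.toNat = 0 ∨ N.toNat ≤ m.toNat := by
      rcases hg with h | h | h
      · exact Or.inl (by omega)
      · exact Or.inr (Or.inl (by omega))
      · exact Or.inr (Or.inr (by omega))
    rw [FF_zero h]
    simp
  · push Not at hg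
    obtain ⟨hN2, hm1, hmN⟩ := hg
    rw [show (m - 1 : Int) = ((m.toNat - 1 : Nat) : Int) by omega,
      binom_fold N (by omega) (m.toNat - 1) (by omega),
      show m.toNat = (m.toNat - 1) + 1 by omega]
    simp only [FF]
    have e1 : N.toNat - 2 = (N - 2).toNat := by omega
    have e2 : ((N.toNat - 1 : Nat) : Int) = N - 1 := by omega
    rw [e1]
    push_cast [e2]
    ring

-- ===== VERDICT (by name: the statement is the Claim_ definition above) =====
theorem calculate_nJ_spec : Claim_equal_calculate_nJ := by
  intro N m _ hm
  unfold Spec_calculate_nJ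
  rw [calc_A_eq N m hm, calc_B_eq N m hm, sumF_eq]
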